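-- pv_equiv track=rewrite | github.com/unknown918/nsdi | sglang/CUHKSZ/disaggregate/static_placement/placement_generator.py | _init_route_experts
-- ===== SOURCE A (Python) =====
-- def _init_route_experts(num_gpus: int, num_expert_per_gpu: int, num_logical_experts: int):
--     """Average partition of logical experts to GPUs as route_experts."""
--     gpu_configs = []
--     experts_per_gpu_base = num_logical_experts // num_gpus
--     extra = num_logical_experts % num_gpus
--     logical_idx = 0
--
--     for gpu in range(num_gpus):
--         count = experts_per_gpu_base + (1 if gpu < extra else 0)
--         route_experts = list(range(logical_idx, logical_idx + count))
--         logical_idx += count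
--         gpu_configs.append({"route_experts": route_experts, "redundant_experts": []})
--     return gpu_configs
-- ===== SOURCE B (Python) =====
-- def _init_route_experts(num_gpus: int, num_expert_per_gpu: int, num_logical_experts: int):
--     """Average partition of logical experts to GPUs as route_experts (closed-form slices)."""
--     base, extra = divmod(num_logical_experts, num_gpus)
--     return [
--         {
--             "route_experts": list(range(g * base + min(g, extra),
--                                         g * base + min(g, extra) + base + (1 if g < extra else 0))),
--             "redundant_experts": [],
--         }
--         for g in range(num_gpus)
--     ]
-- ===== Notes on version B (the rewrite author's own statement) =====
-- stated objective: alternative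
-- what changed: Replaced the running logical_idx accumulator with a per-GPU closed-form offset g*base + min(g, extra), so each GPU's slice is computed independently in a comprehension instead of a stateful loop.
import Mathlib
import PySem

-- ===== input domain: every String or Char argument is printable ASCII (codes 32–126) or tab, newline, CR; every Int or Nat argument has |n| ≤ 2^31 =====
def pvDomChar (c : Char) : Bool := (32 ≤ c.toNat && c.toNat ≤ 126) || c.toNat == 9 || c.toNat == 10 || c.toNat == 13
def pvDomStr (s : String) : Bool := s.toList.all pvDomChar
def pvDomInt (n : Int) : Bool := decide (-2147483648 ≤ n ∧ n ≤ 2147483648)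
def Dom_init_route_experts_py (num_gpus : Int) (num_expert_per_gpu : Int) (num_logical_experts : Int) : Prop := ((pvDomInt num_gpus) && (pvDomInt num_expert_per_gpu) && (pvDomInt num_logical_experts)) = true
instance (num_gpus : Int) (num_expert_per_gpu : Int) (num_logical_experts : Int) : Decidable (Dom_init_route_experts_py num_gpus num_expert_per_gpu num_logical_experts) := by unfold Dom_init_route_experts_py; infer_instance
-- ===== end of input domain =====

-- B replaces A's running logical_idx accumulator with a per-GPU closed-form offset (alternative decomposition, same cost).


-- ===== PORT A =====
def init_route_experts_py (num_gpus : Int) (num_expert_per_gpu : Int) (num_logical_experts : Int) : List (List (String × List Int)) :=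
  let experts_per_gpu_base := PySem.Int.floordiv num_logical_experts num_gpus
  let extra := PySem.Int.mod num_logical_experts num_gpus
  let res := (PySem.List.pyRange 0 num_gpus 1).foldl
    (fun (st : List (List (String × List Int)) × Int) (gpu : Int) =>
      let count := experts_per_gpu_base + (if gpu < extra then 1 else 0)
      let route_experts := PySem.List.pyRange st.2 (st.2 + count) 1
      (st.1 ++ [[("route_experts", route_experts), ("redundant_experts", ([] : List Int))]],
       st.2 + count))
    ([], 0)
  res.1

-- ===== PORT B =====
def init_route_experts_py_alt (num_gpus : Int) (num_expert_per_gpu : Int) (num_logical_experts : Int) : List (List (String × List Int)) :=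
  let base := PySem.Int.floordiv num_logical_experts num_gpus
  let extra := PySem.Int.mod num_logical_experts num_gpus
  (PySem.List.pyRange 0 num_gpus 1).map (fun g =>
    let start := g * base + min g extra
    [("route_experts", PySem.List.pyRange start (start + base + (if g < extra then 1 else 0)) 1),
     ("redundant_experts", ([] : List Int))])

-- ===== PRECONDITION & SPEC =====
-- Pre_ excludes exactly num_gpus = 0, where A raises ZeroDivisionError.
def Pre_init_route_experts_py (num_gpus : Int) (num_expert_per_gpu : Int) (num_logical_experts : Int) : Prop := num_gpus ≠ 0
instance (num_gpus : Int) (num_expert_per_gpu : Int) (num_logical_experts : Int) : Decidable (Pre_init_route_experts_py num_gpus num_expert_per_gpu num_logical_experts) := by unfold Pre_init_route_experts_py; infer_instance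
def pvWitness_init_route_experts_py : Int × Int × Int := (3, 2, 8)

def Spec_init_route_experts_py (num_gpus : Int) (num_expert_per_gpu : Int) (num_logical_experts : Int) (out : List (List (String × List Int))) : Prop := out = init_route_experts_py_alt num_gpus num_expert_per_gpu num_logical_experts
instance (num_gpus : Int) (num_expert_per_gpu : Int) (num_logical_experts : Int) (out : List (List (String × List Int))) : Decidable (Spec_init_route_experts_py num_gpus num_expert_per_gpu num_logical_experts out) := by unfold Spec_init_route_experts_py; infer_instance

-- ===== CLAIM (what is proved, stated in full; the proofs are below) =====
def Claim_equal_init_route_experts_py : Prop := ∀ (num_gpus : Int) (num_expert_per_gpu : Int) (num_logical_experts : Int), Dom_init_route_experts_py num_gpus num_expert_per_gpu num_logical_experts → Pre_init_route_experts_py num_gpus num_expert_per_gpu num_logical_experts → Spec_init_route_experts_py num_gpus num_expert_per_gpu num_logical_experts (init_route_experts_py num_gpus num_expert_per_gpu num_logical_experts)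

-- ===== LEMMAS AND PROOFS =====

-- one loop step of A
def pvStepA (base extra : Int) (st : List (List (String × List Int)) × Int) (gpu : Int) :
    List (List (String × List Int)) × Int :=
  let count := base + (if gpu < extra then 1 else 0)
  (st.1 ++ [[("route_experts", PySem.List.pyRange st.2 (st.2 + count) 1),
             ("redundant_experts", ([] : List Int))]],
   st.2 + count)

-- B's per-GPU config
def pvCfgB (base extra : Int) (g : Int) : List (String × List Int) :=
  let start := g * base + min g extra
  [("route_experts", PySem.List.pyRange start (start + base + (if g < extra then 1 else 0)) 1),
   ("redundant_experts", ([] : List Int))]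

-- Invariant: after folding over range(0, n), A's accumulator equals B's map and the
-- running index equals the closed form n*base + min n extra (for 0 ≤ extra).
lemma pv_loop_eq (base extra : Int) (hx : 0 ≤ extra) (n : Nat) :
    (PySem.List.pyRange 0 (n : Int) 1).foldl (pvStepA base extra) ([], 0)
      = ((PySem.List.pyRange 0 (n : Int) 1).map (pvCfgB base extra),
         (n : Int) * base + min (n : Int) extra) := by
  induction n with
  | zero => simp [PySem.List.pyRange_one_eq_nil]; omega
  | succ n ih =>
    have h : ((n : Int) + 1) = ((n + 1 : Nat) : Int) := by push_cast; ring
    have hsplit := PySem.List.pyRange_one_succ_right (a := 0) (b := (n : Int)) (by positivity)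
    rw [← h, hsplit, List.foldl_append, List.map_append, ih]
    simp only [List.foldl_cons, List.foldl_nil, List.map_cons, List.map_nil]
    unfold pvStepA pvCfgB
    simp only
    apply Prod.ext
    · simp only
      congr 4; ring_nf
    · simp only
      have hm : min ((n : Int) + 1) extra = min (n : Int) extra + (if (n : Int) < extra then 1 else 0) := by
        split_ifs <;> omega
      rw [hm, add_mul, one_mul]; ring

-- the same invariant with an Int bound
lemma pv_loop_eq' (base extra gI : Int) (hg : 0 ≤ gI) (hx : 0 ≤ extra) :
    (PySem.List.pyRange 0 gI 1).foldl (pvStepA base extra) ([], 0)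
      = ((PySem.List.pyRange 0 gI 1).map (pvCfgB base extra),
         gI * base + min gI extra) := by
  obtain ⟨n, rfl⟩ := Int.eq_ofNat_of_zero_le hg
  exact pv_loop_eq base extra hx n

-- ===== VERDICT (by name: the statement is the Claim_ definition above) =====
theorem init_route_experts_py_spec : Claim_equal_init_route_experts_py := by
  intro g e l _ hpre
  unfold Spec_init_route_experts_py init_route_experts_py init_route_experts_py_alt
  rcases lt_trichotomy g 0 with hg | hg | hg
  · simp [PySem.List.pyRange_one_eq_nil (by omega : g ≤ 0)]
  · exact absurd hg hpre
  · have hx : 0 ≤ PySem.Int.mod l g := by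
      rw [PySem.Int.mod_eq_emod_of_pos hg]; exact Int.emod_nonneg _ (by omega)
    exact congrArg Prod.fst
      (pv_loop_eq' (PySem.Int.floordiv l g) (PySem.Int.mod l g) g (le_of_lt hg) hx)
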